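-- pv_equiv track=rewrite | github.com/LeoCodes21/ctf-writeups | Flare-On 2020/01-fidler/flag_decoder.py | decode_flag
-- ===== SOURCE A (Python) =====
-- def decode_flag(frob):
--     last_value = frob
--     encoded_flag = [
--         1135, 1038, 1126, 1028, 1117, 1071, 1094, 1077,
--         1121, 1087, 1110, 1092, 1072, 1095, 1090, 1027,
--         1127, 1040, 1137, 1030, 1127, 1099, 1062, 1101,
--         1123, 1027, 1136, 1054
--     ]
--     decoded_flag = []
--
--     for i in range(len(encoded_flag)):
--         c = encoded_flag[i]
--         val = (c - ((i%2)*1 + (i%3)*2)) ^ last_value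
--         decoded_flag.append(val)
--         last_value = c
--
--     return ''.join([chr(x) for x in decoded_flag])
-- ===== SOURCE B (Python) =====
-- def decode_flag(frob):
--     # Only the first decoded character depends on frob: for i >= 1 the loop XORs
--     # one fixed constant with another fixed constant, so the tail is a constant
--     # string (partial evaluation of the fixed decoder).
--     return chr(1135 ^ frob) + "dle_with_kitty@flare-on.com"
-- ===== Notes on version B (the rewrite author's own statement) =====
-- stated objective: simpler
-- what changed: B partially evaluates the fixed decoder: for i>=1 the loop XORs one constant with another, so B returns chr(1135 ^ frob) concatenated with the precomputed constant tail, eliminating the loop and all mutable state.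
-- outside the precondition, e.g. on decode_flag(-1): A raises ValueError, B raises ValueError; on decode_flag(1114112): A raises ValueError, B raises ValueError
import Mathlib
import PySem

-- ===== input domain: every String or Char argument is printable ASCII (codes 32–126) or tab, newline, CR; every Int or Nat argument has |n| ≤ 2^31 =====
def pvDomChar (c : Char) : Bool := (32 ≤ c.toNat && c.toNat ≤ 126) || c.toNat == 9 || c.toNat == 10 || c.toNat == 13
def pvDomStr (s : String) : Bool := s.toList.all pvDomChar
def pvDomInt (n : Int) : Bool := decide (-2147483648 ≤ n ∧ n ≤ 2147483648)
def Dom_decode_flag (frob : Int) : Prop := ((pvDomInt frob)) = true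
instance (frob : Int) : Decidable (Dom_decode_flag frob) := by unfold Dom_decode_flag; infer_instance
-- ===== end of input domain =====

-- B partially evaluates the fixed decoder (only the first character depends on frob;
-- the rest is a precomputed constant string), removing the loop entirely (objective: simpler).

-- ===== PORT A =====
-- the fixed constant list from A
def pvEncodedFlag : List Int :=
  [1135, 1038, 1126, 1028, 1117, 1071, 1094, 1077,
   1121, 1087, 1110, 1092, 1072, 1095, 1090, 1027,
   1127, 1040, 1137, 1030, 1127, 1099, 1062, 1101,
   1123, 1027, 1136, 1054]

-- loop `for i in range(len(encoded_flag))` threading (last_value, decoded_flag);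
-- chr(x) ported as Char.ofNat x.toNat, exact under Pre_ (valid non-surrogate codepoint)
def decode_flag (frob : Int) : String :=
  let encoded_flag := pvEncodedFlag
  let step := fun (st : Int × List Int) (i : Int) =>
    let c := (PySem.List.pyGet? encoded_flag i).getD 0
    let val := Int.xor (c - ((PySem.Int.mod i 2) * 1 + (PySem.Int.mod i 3) * 2)) st.1
    (c, st.2 ++ [val])
  let res := (PySem.List.pyRange 0 (encoded_flag.length) 1).foldl step (frob, [])
  String.ofList (res.2.map (fun x => Char.ofNat x.toNat))

-- ===== PORT B =====
-- chr(1135 ^ frob) + constant tail; no loop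
def decode_flag_alt (frob : Int) : String :=
  String.ofList (Char.ofNat (Int.xor 1135 frob).toNat :: "dle_with_kitty@flare-on.com".toList)

-- ===== PRECONDITION & SPEC =====
-- Pre_ excludes inputs where Python's chr raises (negative frob, or 1135^frob above the
-- codepoint maximum) and those whose first character would be a lone surrogate, which A
-- returns as a str but a Lean String cannot represent.
def Pre_decode_flag (frob : Int) : Prop :=
  0 ≤ frob ∧
  (Int.xor 1135 frob < 0xD800 ∨ (0xE000 ≤ Int.xor 1135 frob ∧ Int.xor 1135 frob ≤ 0x10FFFF))
instance (frob : Int) : Decidable (Pre_decode_flag frob) := by unfold Pre_decode_flag; infer_instance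
def pvWitness_decode_flag : Int := (0)
def Spec_decode_flag (frob : Int) (out : String) : Prop := out = decode_flag_alt frob
instance (frob : Int) (out : String) : Decidable (Spec_decode_flag frob out) := by unfold Spec_decode_flag; infer_instance

-- ===== CLAIM (what is proved, stated in full; the proofs are below) =====
def Claim_equal_decode_flag : Prop := ∀ (frob : Int), Dom_decode_flag frob → Pre_decode_flag frob → Spec_decode_flag frob (decode_flag frob)

-- ===== LEMMAS AND PROOFS =====

-- ===== VERDICT (by name: the statement is the Claim_ definition above) =====
theorem decode_flag_spec : Claim_equal_decode_flag := by
  intro frob _ _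
  unfold Spec_decode_flag decode_flag decode_flag_alt
  simp [pvEncodedFlag, PySem.List.pyRange, PySem.List.pyGet?, PySem.List.pyIdx?,
        PySem.Int.mod, String.ofList, List.range_succ]
  congr 1
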